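-- pv_equiv track=rewrite | github.com/jmartinmaster/Project-Librarian | project_librarian.py | _select_recommended_model
-- ===== SOURCE A (Python) =====
-- def _select_recommended_model(models, preferred_model=None):
--     preferred = str(preferred_model or "").strip()
--     if preferred and preferred in models:
--         return preferred
--
--     ranked_groups = [
--         [model for model in models if "qwen" in model.lower() and "coder" in model.lower()],
--         [model for model in models if "qwen" in model.lower()],
--         list(models),
--     ]
--     for group in ranked_groups:
--         if group:
--             return group[0]
--     return None
-- ===== SOURCE B (Python) =====
-- def _select_recommended_model(models, preferred_model=None):
--     preferred = str(preferred_model or "").strip()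
--     if preferred and preferred in models:
--         return preferred
--     best_rank, best_model = 3, None
--     for model in models:
--         low = model.lower()
--         if "qwen" in low and "coder" in low:
--             rank = 0
--         elif "qwen" in low:
--             rank = 1
--         else:
--             rank = 2
--         if rank < best_rank:
--             best_rank, best_model = rank, model
--             if rank == 0:
--                 break
--     return best_model
-- ===== Notes on version B (the rewrite author's own statement) =====
-- stated objective: simpler
-- what changed: Replaces building three filtered ranked lists and scanning them with a single min-rank-tracking pass over models (lower() computed once per model, early exit on a top-rank hit); the preferred-model guard is kept.
import Mathlib
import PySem

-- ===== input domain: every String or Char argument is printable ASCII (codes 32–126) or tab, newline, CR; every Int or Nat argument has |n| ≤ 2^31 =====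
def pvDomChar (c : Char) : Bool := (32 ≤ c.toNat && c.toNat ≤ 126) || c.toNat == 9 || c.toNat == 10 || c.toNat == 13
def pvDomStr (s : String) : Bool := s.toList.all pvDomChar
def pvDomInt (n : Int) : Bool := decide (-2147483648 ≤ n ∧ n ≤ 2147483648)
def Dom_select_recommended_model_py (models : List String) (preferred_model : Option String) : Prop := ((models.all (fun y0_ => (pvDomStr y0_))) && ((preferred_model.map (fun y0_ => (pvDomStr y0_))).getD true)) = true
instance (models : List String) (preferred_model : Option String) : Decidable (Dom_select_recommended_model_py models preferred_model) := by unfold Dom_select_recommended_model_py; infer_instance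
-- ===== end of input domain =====

-- B replaces A's three filtered ranked lists with one min-rank-tracking pass (lower() once per model, early exit on a top-rank hit); same O(n).


-- ===== PORT A =====
-- the two comprehension conditions of A, named for reuse in the proofs
def srmP0 (m : String) : Bool :=
  PySem.Str.isIn "qwen" (PySem.Str.lower m) && PySem.Str.isIn "coder" (PySem.Str.lower m)
def srmP1 (m : String) : Bool := PySem.Str.isIn "qwen" (PySem.Str.lower m)

def select_recommended_model_py (models : List String) (preferred_model : Option String) : Option String :=
  -- preferred = str(preferred_model or "").strip()
  let preferred := PySem.Str.strip (preferred_model.getD "")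
  if preferred ≠ "" ∧ preferred ∈ models then some preferred
  else
    -- ranked_groups = [ [m | "qwen" and "coder" in m.lower()], [m | "qwen" in m.lower()], list(models) ]
    let g0 := models.filter srmP0
    let g1 := models.filter srmP1
    let g2 := models
    -- for group in ranked_groups: if group: return group[0];  return None
    match g0 with
    | m :: _ => some m
    | [] =>
      match g1 with
      | m :: _ => some m
      | [] =>
        match g2 with
        | m :: _ => some m
        | [] => none

-- ===== PORT B =====
-- the single min-rank-tracking loop of Source B (state = best_rank, best_model; break on rank 0)
def srmAltLoop : List String → Nat → Option String → Option String
  | [], _, best => best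
  | m :: rest, bestRank, best =>
    let low := PySem.Str.lower m
    let r : Nat :=
      if PySem.Str.isIn "qwen" low && PySem.Str.isIn "coder" low then 0
      else if PySem.Str.isIn "qwen" low then 1
      else 2
    if r < bestRank then
      if r = 0 then some m else srmAltLoop rest r (some m)
    else srmAltLoop rest bestRank best

def select_recommended_model_py_alt (models : List String) (preferred_model : Option String) : Option String :=
  let preferred := PySem.Str.strip (preferred_model.getD "")
  if preferred ≠ "" ∧ preferred ∈ models then some preferred
  else srmAltLoop models 3 none

-- ===== PRECONDITION & SPEC =====
def Spec_select_recommended_model_py (models : List String) (preferred_model : Option String) (out : Option String) : Prop := out = select_recommended_model_py_alt models preferred_model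
instance (models : List String) (preferred_model : Option String) (out : Option String) : Decidable (Spec_select_recommended_model_py models preferred_model out) := by unfold Spec_select_recommended_model_py; infer_instance

-- ===== CLAIM (what is proved, stated in full; the proofs are below) =====
def Claim_equal_select_recommended_model_py : Prop := ∀ (models : List String) (preferred_model : Option String), Dom_select_recommended_model_py models preferred_model → Spec_select_recommended_model_py models preferred_model (select_recommended_model_py models preferred_model)

-- ===== LEMMAS AND PROOFS =====

-- loop at threshold 1: only a rank-0 model can still displace the current best
theorem srmAltLoop_one (xs : List String) (b : String) :
    srmAltLoop xs 1 (some b) = some ((xs.find? srmP0).getD b) := by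
  induction xs generalizing b with
  | nil => simp [srmAltLoop]
  | cons x rest ih =>
    by_cases h1 : PySem.Str.isIn "qwen" (PySem.Str.lower x) = true
    · by_cases hc : PySem.Str.isIn "coder" (PySem.Str.lower x) = true
      · simp at h1 hc
        simp [srmAltLoop, srmP0, h1, hc]
      · simp only [Bool.not_eq_true] at hc; simp at h1 hc
        simp [srmAltLoop, srmP0, h1, hc, ih]
    · simp only [Bool.not_eq_true] at h1; simp at h1
      simp [srmAltLoop, srmP0, h1, ih]

-- loop at threshold 2: a rank-0 model wins, else the first rank-≤1 model
theorem srmAltLoop_two (xs : List String) (b : String) :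
    srmAltLoop xs 2 (some b) =
      some ((xs.find? srmP0).getD ((xs.find? srmP1).getD b)) := by
  induction xs generalizing b with
  | nil => simp [srmAltLoop]
  | cons x rest ih =>
    by_cases h1 : srmP1 x = true
    · by_cases hc : PySem.Str.isIn "coder" (PySem.Str.lower x) = true
      · simp only [srmP1] at h1
        simp at h1 hc
        simp [srmAltLoop, srmP0, srmP1, h1, hc]
      · simp only [srmP1] at h1
        simp only [Bool.not_eq_true] at hc; simp at h1 hc
        simp [srmAltLoop, srmP0, srmP1, h1, hc, srmAltLoop_one]
    · simp only [Bool.not_eq_true] at h1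
      simp only [srmP1] at h1; simp at h1
      simp [srmAltLoop, srmP0, srmP1, h1, ih]

-- loop from the initial state = first rank-0 model, else first rank-≤1 model, else the head
theorem srmAltLoop_three (xs : List String) :
    srmAltLoop xs 3 none =
      ((xs.find? srmP0).or ((xs.find? srmP1).or xs.head?)) := by
  induction xs with
  | nil => simp [srmAltLoop]
  | cons x rest ih =>
    by_cases h1 : srmP1 x = true
    · by_cases hc : PySem.Str.isIn "coder" (PySem.Str.lower x) = true
      · simp only [srmP1] at h1
        simp at h1 hc
        simp [srmAltLoop, srmP0, srmP1, h1, hc]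
      · simp only [srmP1] at h1
        simp only [Bool.not_eq_true] at hc; simp at h1 hc
        simp [srmAltLoop, srmP0, srmP1, h1, hc, srmAltLoop_one]
    · simp only [Bool.not_eq_true] at h1
      simp only [srmP1] at h1; simp at h1
      simp [srmAltLoop, srmP0, srmP1, h1, srmAltLoop_two]

-- ===== VERDICT (by name: the statement is the Claim_ definition above) =====
theorem select_recommended_model_py_spec : Claim_equal_select_recommended_model_py := by
  intro models preferred_model _
  unfold Spec_select_recommended_model_py select_recommended_model_py select_recommended_model_py_alt
  by_cases hg : PySem.Str.strip (preferred_model.getD "") ≠ "" ∧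
      PySem.Str.strip (preferred_model.getD "") ∈ models
  · simp only [if_pos hg]
  · simp only [if_neg hg]
    rw [srmAltLoop_three, ← List.head?_filter, ← List.head?_filter]
    cases models.filter srmP0 <;> cases models.filter srmP1 <;> cases models <;>
      simp [Option.or]
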